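-- pv_equiv track=rewrite | github.com/tikna404/DayOfPy | calander_project/Number of Days.py | day
-- ===== SOURCE A (Python) =====
-- def day(n):
--     c=0
--     for i in range(0,n):
--         if(i%2==0):
--             c+=31
--         if(i%2!=0):
--             c+=30
--     return c
-- ===== SOURCE B (Python) =====
-- def day(n):
--     # closed form: pairs of (31+30) plus a leading 31 for an odd remainder
--     if n <= 0:
--         return 0
--     return 61 * (n // 2) + 31 * (n % 2)
-- ===== Notes on version B (the rewrite author's own statement) =====
-- stated objective: faster
-- what changed: replaced the O(n) accumulation loop over range(n) by the closed form 61*(n//2)+31*(n%2)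
import Mathlib
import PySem

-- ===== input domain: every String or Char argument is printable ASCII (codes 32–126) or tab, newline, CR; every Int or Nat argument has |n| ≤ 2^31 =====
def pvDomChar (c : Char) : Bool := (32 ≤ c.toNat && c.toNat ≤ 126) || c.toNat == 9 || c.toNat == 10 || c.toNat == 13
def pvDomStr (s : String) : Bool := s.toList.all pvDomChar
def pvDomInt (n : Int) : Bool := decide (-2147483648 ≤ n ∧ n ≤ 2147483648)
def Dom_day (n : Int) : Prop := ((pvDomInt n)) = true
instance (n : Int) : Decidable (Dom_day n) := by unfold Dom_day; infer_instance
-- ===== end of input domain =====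

-- B replaces A's O(n) accumulation loop by the O(1) closed form 61*(n//2)+31*(n%2).

-- ===== PORT A =====
def day (n : Int) : Int :=
  (PySem.List.pyRange 0 n 1).foldl
    (fun c i =>
      let c := if PySem.Int.mod i 2 = 0 then c + 31 else c
      if PySem.Int.mod i 2 ≠ 0 then c + 30 else c)
    0

-- ===== PORT B =====
def day_alt (n : Int) : Int :=
  if n ≤ 0 then 0
  else 61 * PySem.Int.floordiv n 2 + 31 * PySem.Int.mod n 2

-- ===== PRECONDITION & SPEC =====
def Spec_day (n : Int) (out : Int) : Prop := out = day_alt n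
instance (n : Int) (out : Int) : Decidable (Spec_day n out) := by unfold Spec_day; infer_instance

-- ===== CLAIM (what is proved, stated in full; the proofs are below) =====
def Claim_equal_day : Prop := ∀ (n : Int), Dom_day n → Spec_day n (day n)

-- ===== LEMMAS AND PROOFS =====

theorem day_eq_sum (n : Int) :
    day n = ((PySem.List.pyRange 0 n 1).map
      (fun i => if PySem.Int.mod i 2 = 0 then (31 : Int) else 30)).sum := by
  have h : ∀ (l : List Int) (c : Int),
      l.foldl (fun c i =>
        let c := if PySem.Int.mod i 2 = 0 then c + 31 else c
        if PySem.Int.mod i 2 ≠ 0 then c + 30 else c) c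
      = c + (l.map (fun i => if PySem.Int.mod i 2 = 0 then (31 : Int) else 30)).sum := by
    intro l
    induction l with
    | nil => simp
    | cons x xs ih =>
      intro c
      simp only [List.foldl_cons, List.map_cons, List.sum_cons]
      rw [ih]
      by_cases hx : PySem.Int.mod x 2 = 0
      · simp only [hx, if_pos, ne_eq, not_true_eq_false, if_false]
        ring
      · simp only [hx, ne_eq, not_false_eq_true, if_true, if_false]
        ring
  unfold day
  rw [h]
  simp

theorem day_closed (m : Nat) :
    day (m : Int) = if (m : Int) ≤ 0 then 0
      else 61 * PySem.Int.floordiv (m : Int) 2 + 31 * PySem.Int.mod (m : Int) 2 := by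
  induction m with
  | zero => simp [day]
  | succ k ih =>
    have hk : (0 : Int) ≤ (k : Int) := by exact_mod_cast Nat.zero_le k
    have hcast : ((k + 1 : Nat) : Int) = (k : Int) + 1 := by push_cast; ring
    rw [day_eq_sum, hcast, PySem.List.pyRange_one_succ_right hk, List.map_append,
        List.sum_append, ← day_eq_sum, ih]
    have hm : PySem.Int.mod (k : Int) 2 = ((k % 2 : Nat) : Int) :=
      PySem.Int.mod_natCast k 2
    have hm' : PySem.Int.mod ((k : Int) + 1) 2 = (((k + 1) % 2 : Nat) : Int) := by
      rw [← hcast]; exact PySem.Int.mod_natCast (k + 1) 2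
    have hf : PySem.Int.floordiv (k : Int) 2 = ((k / 2 : Nat) : Int) :=
      PySem.Int.floordiv_natCast k 2
    have hf' : PySem.Int.floordiv ((k : Int) + 1) 2 = (((k + 1) / 2 : Nat) : Int) := by
      rw [← hcast]; exact PySem.Int.floordiv_natCast (k + 1) 2
    simp only [hm, hm', hf, hf', List.map_cons, List.map_nil, List.sum_cons, List.sum_nil]
    rcases Nat.even_or_odd k with ⟨j, hj⟩ | ⟨j, hj⟩
    · subst hj
      have h1 : (j + j) % 2 = 0 := by omega
      have h2 : (j + j + 1) % 2 = 1 := by omega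
      have h3 : (j + j) / 2 = j := by omega
      have h4 : (j + j + 1) / 2 = j := by omega
      rw [h1, h2, h3, h4]
      by_cases hz : j = 0
      · subst hz; norm_num
      · have h5 : ¬ ((j + j : Nat) : Int) ≤ 0 := by
          have := Nat.pos_of_ne_zero hz; push_cast; omega
        have h6 : ¬ ((j + j : Nat) : Int) + 1 ≤ 0 := by push_cast; omega
        simp only [h5, h6, if_false]
        push_cast; ring
    · subst hj
      have h1 : (2 * j + 1) % 2 = 1 := by omega
      have h2 : (2 * j + 1 + 1) % 2 = 0 := by omega
      have h3 : (2 * j + 1) / 2 = j := by omega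
      have h4 : (2 * j + 1 + 1) / 2 = j + 1 := by omega
      rw [h1, h2, h3, h4]
      have h5 : ¬ ((2 * j + 1 : Nat) : Int) ≤ 0 := by push_cast; omega
      have h6 : ¬ ((2 * j + 1 : Nat) : Int) + 1 ≤ 0 := by push_cast; omega
      simp only [h5, h6, if_false]
      push_cast; ring

theorem day_nonpos (n : Int) (h : n ≤ 0) : day n = 0 := by
  unfold day
  rw [PySem.List.pyRange_one_eq_nil h]
  rfl

-- ===== VERDICT (by name: the statement is the Claim_ definition above) =====
theorem day_spec : Claim_equal_day := by
  intro n _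
  unfold Spec_day day_alt
  by_cases h : n ≤ 0
  · rw [day_nonpos n h, if_pos h]
  · obtain ⟨m, rfl⟩ := Int.eq_ofNat_of_zero_le (by omega : (0:Int) ≤ n)
    rw [day_closed m]
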